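-- pv_equiv track=rewrite | github.com/kysiolena/PythonStarter | Lesson_9/live_9.1.py | check_scores
-- ===== SOURCE A (Python) =====
-- def check_scores(passing_score: int, passing_score_budget: int, list_scores: list = []):
--     result = {
--         'students passing': 0,
--         'students passing in budget': 0,
--         'students not passing': 0
--     }
--
--     for student_score in list_scores:
--         if student_score >= passing_score_budget:
--             result['students passing in budget'] += 1
--         elif student_score >= passing_score:
--             result['students passing'] += 1
--         else:
--             result['students not passing'] += 1
--
--     return result
-- ===== SOURCE B (Python) =====
-- def check_scores(passing_score: int, passing_score_budget: int, list_scores: list = []):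
--     in_budget = sum(1 for x in list_scores if x >= passing_score_budget)
--     passing = sum(1 for x in list_scores
--                   if passing_score <= x < passing_score_budget)
--     return {
--         'students passing': passing,
--         'students passing in budget': in_budget,
--         'students not passing': len(list_scores) - in_budget - passing,
--     }
-- ===== Notes on version B (the rewrite author's own statement) =====
-- stated objective: alternative
-- what changed: Replaces the single pass that mutates a dict through a three-way branch by two independent predicate counts (generator sums) plus an arithmetic complement for the third bucket, building the result dict once at the end.
import Mathlib
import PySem

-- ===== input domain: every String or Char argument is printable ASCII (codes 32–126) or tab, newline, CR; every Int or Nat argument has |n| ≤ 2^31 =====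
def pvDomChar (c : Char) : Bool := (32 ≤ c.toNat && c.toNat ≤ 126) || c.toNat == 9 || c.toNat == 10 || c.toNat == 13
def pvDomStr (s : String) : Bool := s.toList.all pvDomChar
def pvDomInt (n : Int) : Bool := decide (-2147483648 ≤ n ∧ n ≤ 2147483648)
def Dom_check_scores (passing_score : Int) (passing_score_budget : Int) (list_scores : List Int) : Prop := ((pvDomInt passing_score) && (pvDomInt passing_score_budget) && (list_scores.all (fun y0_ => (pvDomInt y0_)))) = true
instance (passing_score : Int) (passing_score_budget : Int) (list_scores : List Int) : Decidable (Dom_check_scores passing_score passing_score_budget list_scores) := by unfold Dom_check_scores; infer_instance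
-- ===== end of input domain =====

-- B replaces A's single mutating pass with two predicate counts plus an arithmetic
-- complement for the third bucket (objective: alternative decomposition, same cost).

-- ===== PORT A =====
def check_scores (passing_score : Int) (passing_score_budget : Int) (list_scores : List Int) : List (String × Int) :=
  let result : PySem.Dict String Int :=
    PySem.Dict.mk [("students passing", 0), ("students passing in budget", 0), ("students not passing", 0)]
  (list_scores.foldl (fun result student_score =>
      if passing_score_budget ≤ student_score then
        result.modify "students passing in budget" 0 (· + 1)
      else if passing_score ≤ student_score then
        result.modify "students passing" 0 (· + 1)
      else
        result.modify "students not passing" 0 (· + 1)) result).items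

-- ===== PORT B =====
def check_scores_alt (passing_score : Int) (passing_score_budget : Int) (list_scores : List Int) : List (String × Int) :=
  let in_budget : Int := (list_scores.filter (fun x => passing_score_budget ≤ x)).length
  let passing : Int := (list_scores.filter (fun x => passing_score ≤ x ∧ x < passing_score_budget)).length
  [("students passing", passing),
   ("students passing in budget", in_budget),
   ("students not passing", (list_scores.length : Int) - in_budget - passing)]

-- ===== PRECONDITION & SPEC =====
def Spec_check_scores (passing_score : Int) (passing_score_budget : Int) (list_scores : List Int) (out : List (String × Int)) : Prop := out = check_scores_alt passing_score passing_score_budget list_scores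
instance (passing_score : Int) (passing_score_budget : Int) (list_scores : List Int) (out : List (String × Int)) : Decidable (Spec_check_scores passing_score passing_score_budget list_scores out) := by unfold Spec_check_scores; infer_instance

-- ===== CLAIM (what is proved, stated in full; the proofs are below) =====
def Claim_equal_check_scores : Prop := ∀ (passing_score : Int) (passing_score_budget : Int) (list_scores : List Int), Dom_check_scores passing_score passing_score_budget list_scores → Spec_check_scores passing_score passing_score_budget list_scores (check_scores passing_score passing_score_budget list_scores)

-- ===== LEMMAS AND PROOFS =====

-- A's loop, started from arbitrary counter values, adds the three filter counts.
lemma check_scores_loop (ps psb : Int) (l : List Int) (a b c : Int) :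
    l.foldl (fun result student_score =>
      if psb ≤ student_score then
        result.modify "students passing in budget" 0 (· + 1)
      else if ps ≤ student_score then
        result.modify "students passing" 0 (· + 1)
      else
        result.modify "students not passing" 0 (· + 1))
      (PySem.Dict.mk [("students passing", a), ("students passing in budget", b), ("students not passing", c)])
    = PySem.Dict.mk
        [("students passing", a + ((l.filter (fun x => decide (ps ≤ x) && decide (x < psb))).length : Int)),
         ("students passing in budget", b + ((l.filter (fun x => decide (psb ≤ x))).length : Int)),
         ("students not passing", c + ((l.filter (fun x => decide (x < psb) && decide (x < ps))).length : Int))] := by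
  induction l generalizing a b c with
  | nil => simp
  | cons x xs ih =>
    by_cases h1 : psb ≤ x
    · simp only [List.foldl_cons, if_pos h1, List.filter_cons]
      rw [show (PySem.Dict.mk [("students passing", a), ("students passing in budget", b), ("students not passing", c)]).modify "students passing in budget" 0 (· + 1)
            = PySem.Dict.mk [("students passing", a), ("students passing in budget", b + 1), ("students not passing", c)] from by
          simp [PySem.Dict.modify, PySem.Dict.getD, PySem.Dict.get?, PySem.Dict.insert, PySem.Dict.contains]]
      rw [ih]
      simp [h1, show ¬ x < psb from by omega]
      omega
    · by_cases h2 : ps ≤ x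
      · simp only [List.foldl_cons, if_neg h1, if_pos h2, List.filter_cons]
        rw [show (PySem.Dict.mk [("students passing", a), ("students passing in budget", b), ("students not passing", c)]).modify "students passing" 0 (· + 1)
              = PySem.Dict.mk [("students passing", a + 1), ("students passing in budget", b), ("students not passing", c)] from by
            simp [PySem.Dict.modify, PySem.Dict.getD, PySem.Dict.get?, PySem.Dict.insert, PySem.Dict.contains]]
        rw [ih]
        simp [h1, h2, show x < psb from by omega, show ¬ x < ps from by omega]
        omega
      · simp only [List.foldl_cons, if_neg h1, if_neg h2, List.filter_cons]
        rw [show (PySem.Dict.mk [("students passing", a), ("students passing in budget", b), ("students not passing", c)]).modify "students not passing" 0 (· + 1)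
              = PySem.Dict.mk [("students passing", a), ("students passing in budget", b), ("students not passing", c + 1)] from by
            simp [PySem.Dict.modify, PySem.Dict.getD, PySem.Dict.get?, PySem.Dict.insert, PySem.Dict.contains]]
        rw [ih]
        simp [h1, h2, show x < psb from by omega, show x < ps from by omega]
        omega

-- The three buckets partition the list.
lemma check_scores_partition (ps psb : Int) (l : List Int) :
    (l.filter (fun x => decide (ps ≤ x) && decide (x < psb))).length
      + (l.filter (fun x => decide (psb ≤ x))).length
      + (l.filter (fun x => decide (x < psb) && decide (x < ps))).length = l.length := by
  induction l with
  | nil => simp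
  | cons x xs ih =>
    simp only [List.filter_cons, List.length_cons]
    by_cases h1 : psb ≤ x <;> by_cases h2 : ps ≤ x
    · simp [h1, h2, show ¬ x < psb from by omega]
      omega
    · simp [h1, h2, show ¬ x < psb from by omega]
      omega
    · simp [h1, h2, show x < psb from by omega, show ¬ x < ps from by omega]
      omega
    · simp [h1, h2, show x < psb from by omega, show x < ps from by omega]
      omega

-- ===== VERDICT (by name: the statement is the Claim_ definition above) =====
theorem check_scores_spec : Claim_equal_check_scores := by
  intro ps psb l _hdom
  show check_scores ps psb l = check_scores_alt ps psb l
  simp only [check_scores, check_scores_alt]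
  rw [check_scores_loop]
  have h := check_scores_partition ps psb l
  have h3 : ((l.filter (fun x => decide (x < psb) && decide (x < ps))).length : Int)
      = (l.length : Int) - (l.filter (fun x => decide (psb ≤ x))).length
        - (l.filter (fun x => decide (ps ≤ x) && decide (x < psb))).length := by omega
  simp [h3]
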